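-- pv_equiv track=rewrite | github.com/YitongHu/Regex | regex_functions.py | extra_exceptions
-- ===== SOURCE A (Python) =====
-- def extra_exceptions(s):
--     ''' (str) -> bool
--     Make sure that when a there is a parenthises it closes at least 4 from
--     the last open parenthesis
--     >>> extra_exceptions('((2**).0)')
--     False
--     >>> extra_exceptions('((2*).0)')
--     False
--     >>> extra_exceptions('((2*.1).0)')
--     True
--     >>> extra_exceptions('((1.1).2)')
--     True
--     '''
--     # create variable to be zero for the loop and output
--     counter = 0
--     output = 0
--     # loop to check for letters
--     for letter in s:
--         # when it find the right letter at the right place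
--         if letter == '(' and counter < len(s) - 3:
--             # second letter from it can't be ')'
--             if s[counter + 2] == ')':
--                 output += 1
--             # third letter from it can't be ')'
--             if s[counter + 2] == ')':
--                 output += 1
--             # fourth letter from it can't be ')'
--             if s[counter + 3] == ')':
--                 output += 1
--             # fourth letter from it can't be '*'
--             if s[counter + 3] == '*':
--                 output += 1
--         # index counter add one
--         counter += 1
--     return output == 0
-- ===== SOURCE B (Python) =====
-- def extra_exceptions(s):
--     # Staged set construction: collect the positions of openers that have a full
--     # 3-char window, and the positions a closer or star would threaten; the string
--     # is fine iff the two index sets are disjoint.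
--     n = len(s)
--     opens = {i for i, c in enumerate(s) if c == '(' and i < n - 3}
--     threats = {i - 2 for i, c in enumerate(s) if c == ')'} | \
--               {i - 3 for i, c in enumerate(s) if c in ')*'}
--     return opens.isdisjoint(threats)
-- ===== Notes on version B (the rewrite author's own statement) =====
-- stated objective: alternative
-- what changed: Replaced the index-counter loop that inspects a 4-char window at each open parenthesis by staged set construction: one pass collects the eligible opener positions, further passes collect the positions each closer or star threatens, and the answer is set disjointness.
import Mathlib
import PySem

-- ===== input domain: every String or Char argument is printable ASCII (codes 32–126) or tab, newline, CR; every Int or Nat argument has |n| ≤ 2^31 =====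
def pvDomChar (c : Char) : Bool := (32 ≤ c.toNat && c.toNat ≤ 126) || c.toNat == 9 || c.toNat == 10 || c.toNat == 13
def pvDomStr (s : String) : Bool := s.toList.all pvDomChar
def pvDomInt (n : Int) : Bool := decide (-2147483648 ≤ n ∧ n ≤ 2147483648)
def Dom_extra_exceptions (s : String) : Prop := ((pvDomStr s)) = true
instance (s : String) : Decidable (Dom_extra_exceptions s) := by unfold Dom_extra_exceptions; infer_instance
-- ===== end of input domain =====

-- B replaces A's index-counter window loop by staged set construction: one pass collects
-- the eligible opener positions, further passes the positions closers/stars threaten; result = disjointness.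

-- ===== PORT A =====
-- loop body of A's `for letter in s`, state (counter, output)
def extra_exceptions_step (s : String) (n : Int) (st : Int × Int) (letter : Char) : Int × Int :=
  if letter = '(' ∧ st.1 < n - 3 then
    let o1 := if PySem.Str.pyGet? s (st.1 + 2) = some ')' then st.2 + 1 else st.2
    let o2 := if PySem.Str.pyGet? s (st.1 + 2) = some ')' then o1 + 1 else o1
    let o3 := if PySem.Str.pyGet? s (st.1 + 3) = some ')' then o2 + 1 else o2
    let o4 := if PySem.Str.pyGet? s (st.1 + 3) = some '*' then o3 + 1 else o3
    (st.1 + 1, o4)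
  else (st.1 + 1, st.2)

def extra_exceptions (s : String) : Bool :=
  let n : Int := PySem.Str.len s
  let r := s.toList.foldl (extra_exceptions_step s n) (0, 0)
  decide (r.2 = 0)

-- ===== PORT B =====
def extra_exceptions_alt (s : String) : Bool :=
  let n : Int := PySem.Str.len s
  let e := PySem.List.enumerate s.toList
  let opens : PySem.Set Int :=
    PySem.Set.ofList ((e.filter (fun p => p.2 == '(' && decide (p.1 < n - 3))).map (·.1))
  let t1 : PySem.Set Int :=
    PySem.Set.ofList ((e.filter (fun p => p.2 == ')')).map (fun p => p.1 - 2))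
  let t2 : PySem.Set Int :=
    PySem.Set.ofList ((e.filter (fun p => p.2 == ')' || p.2 == '*')).map (fun p => p.1 - 3))
  PySem.Set.isdisjoint opens (PySem.Set.union t1 t2)

-- ===== PRECONDITION & SPEC =====
def Spec_extra_exceptions (s : String) (out : Bool) : Prop := out = extra_exceptions_alt s
instance (s : String) (out : Bool) : Decidable (Spec_extra_exceptions s out) := by unfold Spec_extra_exceptions; infer_instance

-- ===== CLAIM (what is proved, stated in full; the proofs are below) =====
def Claim_equal_extra_exceptions : Prop := ∀ (s : String), Dom_extra_exceptions s → Spec_extra_exceptions s (extra_exceptions s)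

-- ===== LEMMAS AND PROOFS =====

-- amount A's loop body adds to `output` at counter k on letter c
def wA (s : String) (n : Int) (c : Char) (k : Int) : Int :=
  if c = '(' ∧ k < n - 3 then
    (if PySem.Str.pyGet? s (k + 2) = some ')' then (1:Int) else 0)
    + (if PySem.Str.pyGet? s (k + 2) = some ')' then (1:Int) else 0)
    + (if PySem.Str.pyGet? s (k + 3) = some ')' then (1:Int) else 0)
    + (if PySem.Str.pyGet? s (k + 3) = some '*' then (1:Int) else 0)
  else 0

def wsum (s : String) (n : Int) : List Char → Int → Int
  | [], _ => 0
  | c :: t, k => wA s n c k + wsum s n t (k + 1)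

lemma step_eq (s : String) (n : Int) (k o : Int) (c : Char) :
    extra_exceptions_step s n (k, o) c = (k + 1, o + wA s n c k) := by
  unfold extra_exceptions_step wA
  split_ifs <;> simp <;> ring

lemma fold_eq (s : String) (n : Int) (l : List Char) (k o : Int) :
    l.foldl (extra_exceptions_step s n) (k, o) = (k + l.length, o + wsum s n l k) := by
  induction l generalizing k o with
  | nil => simp [wsum]
  | cons c t ih =>
      rw [List.foldl_cons, step_eq, ih]
      refine Prod.ext ?_ ?_ <;> simp [wsum] <;> ring

lemma wA_nonneg (s : String) (n : Int) (c : Char) (k : Int) : 0 ≤ wA s n c k := by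
  unfold wA; split_ifs <;> omega

lemma wsum_nonneg (s : String) (n : Int) (l : List Char) (k : Int) : 0 ≤ wsum s n l k := by
  induction l generalizing k with
  | nil => simp [wsum]
  | cons c t ih => have := wA_nonneg s n c k; have := ih (k + 1); simp [wsum]; omega

lemma wsum_eq_zero_iff (s : String) (n : Int) (l : List Char) (k : Int) :
    wsum s n l k = 0 ↔ ∀ j (h : j < l.length), wA s n l[j] (k + j) = 0 := by
  induction l generalizing k with
  | nil => simp [wsum]
  | cons c t ih =>
      have h1 := wA_nonneg s n c k
      have h2 := wsum_nonneg s n t (k + 1)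
      constructor
      · intro h j hj
        have hc : wA s n c k = 0 ∧ wsum s n t (k + 1) = 0 := by
          simp [wsum] at h; omega
        match j with
        | 0 => simpa using hc.1
        | j + 1 =>
            have := (ih (k + 1)).mp hc.2 j (by simpa using hj)
            simpa [add_assoc, add_comm, add_left_comm] using this
      · intro h
        have h0 : wA s n c k = 0 := by simpa using h 0 (by simp)
        have ht : wsum s n t (k + 1) = 0 := by
          refine (ih (k + 1)).mpr ?_
          intro j hj
          have := h (j + 1) (by simpa using hj)
          simpa [add_assoc, add_comm, add_left_comm] using this
        simp [wsum, h0, ht]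

-- the no-go condition both programs detect, at window start index j
def badAt (cs : List Char) (j : Nat) (h : j + 3 < cs.length) : Prop :=
  cs[j] = '(' ∧ (cs[j + 2] = ')' ∨ cs[j + 3] = ')' ∨ cs[j + 3] = '*')

lemma wA_zero_iff (s : String) (j : Nat) (h : j + 3 < s.toList.length) :
    wA s (PySem.Str.len s) s.toList[j] j = 0 ↔ ¬ badAt s.toList j h := by
  have hn : PySem.Str.len s = (s.toList.length : Int) := by
    simp [PySem.Str.len_eq]
  have h2 : PySem.Str.pyGet? s ((j : Int) + 2) = some s.toList[j + 2] := by
    have : ((j : Int) + 2) = ((j + 2 : Nat) : Int) := by push_cast; ring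
    rw [this, PySem.Str.pyGet?_natCast, List.getElem?_eq_getElem (by omega)]
  have h3 : PySem.Str.pyGet? s ((j : Int) + 3) = some s.toList[j + 3] := by
    have : ((j : Int) + 3) = ((j + 3 : Nat) : Int) := by push_cast; ring
    rw [this, PySem.Str.pyGet?_natCast, List.getElem?_eq_getElem (by omega)]
  have hj : (j : Int) < PySem.Str.len s - 3 := by rw [hn]; omega
  unfold wA badAt
  rw [h2, h3]
  simp only [hj, and_true, Option.some.injEq]
  split_ifs <;> simp_all

lemma A_iff (s : String) :
    extra_exceptions s = true ↔ ∀ j (h : j + 3 < s.toList.length), ¬ badAt s.toList j h := by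
  rw [show extra_exceptions s
      = decide ((s.toList.foldl (extra_exceptions_step s (PySem.Str.len s)) (0, 0)).2 = 0) from rfl]
  rw [fold_eq]
  simp only [decide_eq_true_eq, zero_add]
  rw [wsum_eq_zero_iff]
  constructor
  · intro h j hj
    have := h j (by omega)
    rw [← wA_zero_iff s j hj]
    simpa using this
  · intro h j hj
    by_cases hb : j + 3 < s.toList.length
    · have := (wA_zero_iff s j hb).mpr (h j hb)
      simpa using this
    · -- counter is too large: the guard `j < n - 3` fails, so wA = 0
      have hn : PySem.Str.len s = (s.toList.length : Int) := by simp [PySem.Str.len_eq]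
      unfold wA
      rw [if_neg]
      rintro ⟨-, hlt⟩
      rw [hn] at hlt
      omega

-- membership in enumerate, by index
lemma mem_enumerate_iff {α : Type} (xs : List α) (st : Int) (p : Int × α) :
    p ∈ PySem.List.enumerate xs st ↔ ∃ k, ∃ h : k < xs.length, p = (st + k, xs[k]) := by
  induction xs generalizing st with
  | nil => simp [PySem.List.enumerate_nil]
  | cons x t ih =>
      rw [PySem.List.enumerate_cons]
      simp only [List.mem_cons, ih]
      constructor
      · rintro (rfl | ⟨k, hk, rfl⟩)
        · exact ⟨0, by simp, by simp⟩
        · exact ⟨k + 1, by simpa using hk, by push_cast; simp; ring_nf⟩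
      · rintro ⟨k, hk, rfl⟩
        match k with
        | 0 => left; simp
        | k + 1 =>
            right
            exact ⟨k, by simpa using hk, by push_cast; simp; ring_nf⟩

lemma B_iff (s : String) :
    extra_exceptions_alt s = true ↔ ∀ j (h : j + 3 < s.toList.length), ¬ badAt s.toList j h := by
  unfold extra_exceptions_alt
  rw [PySem.Set.isdisjoint_iff]
  set cs := s.toList with hcs
  have hn : PySem.Str.len s = (cs.length : Int) := by simp [PySem.Str.len_eq, hcs]
  -- characterise the three sets
  have hopen : ∀ x : Int,
      x ∈ PySem.Set.ofList (((PySem.List.enumerate cs).filter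
          (fun p => p.2 == '(' && decide (p.1 < PySem.Str.len s - 3))).map (·.1)) ↔
      ∃ k, ∃ h : k < cs.length, cs[k] = '(' ∧ (k : Int) < PySem.Str.len s - 3 ∧ x = k := by
    intro x
    rw [PySem.Set.mem_ofList]
    simp only [List.mem_map, List.mem_filter, mem_enumerate_iff, Bool.and_eq_true, beq_iff_eq,
      decide_eq_true_eq]
    constructor
    · rintro ⟨p, ⟨⟨k, hk, rfl⟩, hc, hlt⟩, rfl⟩
      exact ⟨k, hk, hc, by simpa using hlt, by simp⟩
    · rintro ⟨k, hk, hc, hlt, rfl⟩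
      exact ⟨((k : Int), cs[k]), ⟨⟨k, hk, by simp⟩, hc, by simpa using hlt⟩, rfl⟩
  have ht1 : ∀ x : Int,
      x ∈ PySem.Set.ofList (((PySem.List.enumerate cs).filter
          (fun p => p.2 == ')')).map (fun p => p.1 - 2)) ↔
      ∃ k, ∃ h : k < cs.length, cs[k] = ')' ∧ x = (k : Int) - 2 := by
    intro x
    rw [PySem.Set.mem_ofList]
    simp only [List.mem_map, List.mem_filter, mem_enumerate_iff, beq_iff_eq]
    constructor
    · rintro ⟨p, ⟨⟨k, hk, rfl⟩, hc⟩, rfl⟩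
      exact ⟨k, hk, hc, by simp⟩
    · rintro ⟨k, hk, hc, rfl⟩
      exact ⟨((k : Int), cs[k]), ⟨⟨k, hk, by simp⟩, hc⟩, by simp⟩
  have ht2 : ∀ x : Int,
      x ∈ PySem.Set.ofList (((PySem.List.enumerate cs).filter
          (fun p => p.2 == ')' || p.2 == '*')).map (fun p => p.1 - 3)) ↔
      ∃ k, ∃ h : k < cs.length, (cs[k] = ')' ∨ cs[k] = '*') ∧ x = (k : Int) - 3 := by
    intro x
    rw [PySem.Set.mem_ofList]
    simp only [List.mem_map, List.mem_filter, mem_enumerate_iff, Bool.or_eq_true, beq_iff_eq]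
    constructor
    · rintro ⟨p, ⟨⟨k, hk, rfl⟩, hc⟩, rfl⟩
      exact ⟨k, hk, hc, by simp⟩
    · rintro ⟨k, hk, hc, rfl⟩
      exact ⟨((k : Int), cs[k]), ⟨⟨k, hk, by simp⟩, hc⟩, by simp⟩
  constructor
  · intro h j hj hb
    obtain ⟨hA, hB⟩ := hb
    have hx : ((j : Int)) ∈ _ := (hopen (j : Int)).mpr ⟨j, by omega, hA, by rw [hn]; omega, rfl⟩
    refine h _ hx ?_
    rw [PySem.Set.mem_union]
    rcases hB with h' | h' | h'
    · left; exact (ht1 _).mpr ⟨j + 2, by omega, h', by push_cast; ring⟩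
    · right; exact (ht2 _).mpr ⟨j + 3, by omega, Or.inl h', by push_cast; ring⟩
    · right; exact (ht2 _).mpr ⟨j + 3, by omega, Or.inr h', by push_cast; ring⟩
  · intro h x hx hmem
    obtain ⟨j, hj, hA, hlt, rfl⟩ := (hopen x).mp hx
    have hj3 : j + 3 < cs.length := by rw [hn] at hlt; omega
    refine h j hj3 ⟨hA, ?_⟩
    rw [PySem.Set.mem_union] at hmem
    rcases hmem with hm | hm
    · obtain ⟨k, hk, hc, he⟩ := (ht1 _).mp hm
      have : k = j + 2 := by omega
      subst this; left; exact hc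
    · obtain ⟨k, hk, hc, he⟩ := (ht2 _).mp hm
      have : k = j + 3 := by omega
      subst this
      rcases hc with hc | hc
      · right; left; exact hc
      · right; right; exact hc

-- ===== VERDICT (by name: the statement is the Claim_ definition above) =====
theorem extra_exceptions_spec : Claim_equal_extra_exceptions := by
  intro s _
  unfold Spec_extra_exceptions
  have h := (A_iff s).trans (B_iff s).symm
  cases hA : extra_exceptions s <;> cases hB : extra_exceptions_alt s <;> simp_all
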